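-- pv_equiv track=rewrite | github.com/Tofuni/code_demos_python | exercises/max_diff_list_lr.py | max_diff_in_list_lr
-- ===== SOURCE A (Python) =====
-- def max_diff_in_list_lr(s):
-- 	max_diff = 0
-- 	idxs = [0,0]
-- 	for i in range(len(s)):
-- 		for j in range(i+1, len(s)):
-- 			if s[i]-s[j] > max_diff:
-- 				max_diff = s[i]-s[j]
-- 				idxs = [i,j]
-- 	return idxs
-- ===== SOURCE B (Python) =====
-- def max_diff_in_list_lr(s):
--     # One backward pass builds, for each i, the minimum of s[i+1:] together with
--     # its earliest index; one forward pass then picks the best drop s[i] - min.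
--     sufs = []
--     cur = None
--     for k in range(len(s) - 1, 0, -1):
--         if cur is None or s[k] <= cur[0]:
--             cur = (s[k], k)
--         sufs.append(cur)
--     sufs.reverse()  # sufs[i] = (min of s[i+1:], earliest index of that min)
--     best = 0
--     idxs = [0, 0]
--     for i in range(len(sufs)):
--         m, j = sufs[i]
--         if s[i] - m > best:
--             best = s[i] - m
--             idxs = [i, j]
--     return idxs
-- ===== Notes on version B (the rewrite author's own statement) =====
-- stated objective: faster
-- what changed: Replaces A's nested scan over all index pairs with a single backward pass that records the suffix minimum (value and earliest index) and one forward pass comparing each element against it.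
import Mathlib
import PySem

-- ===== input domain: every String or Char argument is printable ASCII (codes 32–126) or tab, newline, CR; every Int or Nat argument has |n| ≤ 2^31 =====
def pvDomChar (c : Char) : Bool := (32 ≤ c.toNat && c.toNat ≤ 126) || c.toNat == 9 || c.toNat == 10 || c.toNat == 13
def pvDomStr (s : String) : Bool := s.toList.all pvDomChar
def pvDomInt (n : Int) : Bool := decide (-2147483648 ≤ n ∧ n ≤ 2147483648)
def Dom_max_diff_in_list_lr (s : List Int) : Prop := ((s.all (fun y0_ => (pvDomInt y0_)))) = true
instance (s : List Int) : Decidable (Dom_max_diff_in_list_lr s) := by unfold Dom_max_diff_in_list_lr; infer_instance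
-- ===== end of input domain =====

-- B replaces A's quadratic pair scan by a backward suffix-minimum pass plus one forward pass (O(n)); return value only, no mutation.

-- ===== PORT A =====
-- all s[i]/s[j] accesses have indices from range(len(s)) / range(i+1, len(s)), always in range, so pyGetD is exact here
def max_diff_in_list_lr (s : List Int) : List Int :=
  ((PySem.List.pyRange 0 (s.length : Int) 1).foldl (fun (st : Int × List Int) i =>
      (PySem.List.pyRange (i + 1) (s.length : Int) 1).foldl (fun (st : Int × List Int) j =>
        if PySem.List.pyGetD s i 0 - PySem.List.pyGetD s j 0 > st.1 then (PySem.List.pyGetD s i 0 - PySem.List.pyGetD s j 0, [i, j]) else st) st)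
    ((0 : Int), ([0, 0] : List Int))).2

-- ===== PORT B =====
-- backward pass building the suffix-min list (Python's `cur is None` is the Option state), then the forward pass;
-- indices k ∈ range(len(s)-1, 0, -1) and i ∈ range(len(sufs)) are always in range, so pyGetD is exact here
def max_diff_in_list_lr_alt (s : List Int) : List Int :=
  let p := (PySem.List.pyRange ((s.length : Int) - 1) 0 (-1)).foldl
      (fun (st : List (Int × Int) × Option (Int × Int)) k =>
        let cur : Int × Int :=
          match st.2 with
          | none => (PySem.List.pyGetD s k 0, k)
          | some c => if PySem.List.pyGetD s k 0 ≤ c.1 then (PySem.List.pyGetD s k 0, k) else c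
        (st.1 ++ [cur], some cur)) (([], none))
  let sufs := p.1.reverse
  ((PySem.List.pyRange 0 (sufs.length : Int) 1).foldl (fun (st : Int × List Int) i =>
      let mj := PySem.List.pyGetD sufs i ((0 : Int), (0 : Int))
      if PySem.List.pyGetD s i 0 - mj.1 > st.1 then (PySem.List.pyGetD s i 0 - mj.1, [i, mj.2]) else st)
    ((0 : Int), ([0, 0] : List Int))).2

-- ===== PRECONDITION & SPEC =====
def Spec_max_diff_in_list_lr (s : List Int) (out : List Int) : Prop := out = max_diff_in_list_lr_alt s
instance (s : List Int) (out : List Int) : Decidable (Spec_max_diff_in_list_lr s out) := by unfold Spec_max_diff_in_list_lr; infer_instance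

-- ===== CLAIM (what is proved, stated in full; the proofs are below) =====
def Claim_equal_max_diff_in_list_lr : Prop := ∀ (s : List Int), Dom_max_diff_in_list_lr s → Spec_max_diff_in_list_lr s (max_diff_in_list_lr s)


-- ===== LEMMAS AND PROOFS =====

-- earliest minimum of a value list, carrying absolute indices starting at k
def minp : List Int → Int → Option (Int × Int)
  | [], _ => none
  | x :: t, k =>
    match minp t (k + 1) with
    | none => some (x, k)
    | some c => if x ≤ c.1 then some (x, k) else c

-- the suffix-min pair of s[k:]
def pvP (s : List Int) (k : Nat) : Int × Int := (minp (s.drop k) (k : Int)).getD (0, 0)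

lemma minp_drop (s : List Int) (k : Nat) (h : k < s.length) :
    minp (s.drop k) (k : Int) =
      match minp (s.drop (k + 1)) ((k : Int) + 1) with
      | none => some (s[k], (k : Int))
      | some c => if s[k] ≤ c.1 then some (s[k], (k : Int)) else c := by
  rw [List.drop_eq_getElem_cons h]
  rfl

lemma minp_eq_none_iff (l : List Int) (k : Int) : minp l k = none ↔ l = [] := by
  cases l with
  | nil => simp [minp]
  | cons x t =>
    simp only [minp]
    cases minp t (k + 1) with
    | none => simp
    | some c => by_cases h : x ≤ c.1 <;> simp [h]

lemma minp_drop_some (s : List Int) (k : Nat) (h : k < s.length) :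
    minp (s.drop k) (k : Int) = some (pvP s k) := by
  cases hm : minp (s.drop k) (k : Int) with
  | none =>
    rw [minp_eq_none_iff, List.drop_eq_nil_iff] at hm
    omega
  | some c => simp [pvP, hm]

lemma innerA (s : List Int) (a iv : Int) :
    ∀ (c : Nat) (j : Int) (st : Int × List Int), 0 ≤ j → j.toNat + c = s.length →
    (PySem.List.pyRange j (s.length : Int) 1).foldl
      (fun (st : Int × List Int) j' =>
        if a - PySem.List.pyGetD s j' 0 > st.1 then (a - PySem.List.pyGetD s j' 0, [iv, j']) else st) st
    = match minp (s.drop j.toNat) j with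
      | none => st
      | some cc => if a - cc.1 > st.1 then (a - cc.1, [iv, cc.2]) else st := by
  intro c
  induction c with
  | zero =>
    intro j st hj hlen
    have hge : (s.length : Int) ≤ j := by omega
    have hdrop : s.drop j.toNat = [] := List.drop_eq_nil_iff.mpr (by omega)
    rw [PySem.List.pyRange_one_eq_nil hge, hdrop]
    rfl
  | succ c ih =>
    intro j st hj hlen
    have hjlt : j < (s.length : Int) := by omega
    have hjn : j.toNat < s.length := by omega
    have hjcast : ((j.toNat : Nat) : Int) = j := Int.toNat_of_nonneg hj
    rw [PySem.List.pyRange_one_cons hjlt, List.foldl_cons,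
        ih (j + 1) _ (by omega) (by omega)]
    have h1 : (j + 1).toNat = j.toNat + 1 := by omega
    have hmd := minp_drop s j.toNat hjn
    rw [hjcast] at hmd
    have hget : PySem.List.pyGetD s j 0 = s[j.toNat] :=
      PySem.List.pyGetD_eq_getElem s 0 hj (by exact_mod_cast hjlt)
    rw [h1, hmd, hget]
    cases hmm : minp (s.drop (j.toNat + 1)) (j + 1) with
    | none => simp only []
    | some cc =>
      simp only []
      by_cases htie : s[j.toNat] ≤ cc.1 <;> simp only [htie, if_pos, if_false] <;>
        split_ifs <;> first | rfl | omega

lemma Bsuf (s : List Int) :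
    ∀ (c : Nat), c < s.length → ∀ (acc : List (Int × Int)),
    (PySem.List.pyRange (c : Int) 0 (-1)).foldl
      (fun (st : List (Int × Int) × Option (Int × Int)) k =>
        let cur : Int × Int :=
          match st.2 with
          | none => (PySem.List.pyGetD s k 0, k)
          | some c => if PySem.List.pyGetD s k 0 ≤ c.1 then (PySem.List.pyGetD s k 0, k) else c
        (st.1 ++ [cur], some cur))
      (acc, minp (s.drop (c + 1)) ((c : Int) + 1))
    = (acc ++ (List.range c).map (fun t => pvP s (c - t)), minp (s.drop 1) 1) := by
  intro c
  induction c with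
  | zero =>
    intro _ acc
    rw [show ((0 : Nat) : Int) = 0 from rfl, PySem.List.pyRange_neg_one_eq_nil le_rfl]
    simp
  | succ c ih =>
    intro hlt acc
    have h0 : (0 : Int) < ((c + 1 : Nat) : Int) := by exact_mod_cast Nat.succ_pos c
    rw [PySem.List.pyRange_neg_one_cons h0, List.foldl_cons]
    have hget : PySem.List.pyGetD s ((c + 1 : Nat) : Int) 0 = s[c + 1] := by
      rw [PySem.List.pyGetD_natCast]
      exact List.getD_eq_getElem _ _ hlt
    -- the updated running minimum is exactly the suffix-min pair of s[(c+1):]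
    have hstep : ∀ (o : Option (Int × Int)), o = minp (s.drop (c + 1 + 1)) (((c + 1 : Nat) : Int) + 1) →
        some (match o with
          | none => (PySem.List.pyGetD s ((c + 1 : Nat) : Int) 0, ((c + 1 : Nat) : Int))
          | some cc => if PySem.List.pyGetD s ((c + 1 : Nat) : Int) 0 ≤ cc.1
              then (PySem.List.pyGetD s ((c + 1 : Nat) : Int) 0, ((c + 1 : Nat) : Int)) else cc)
        = minp (s.drop (c + 1)) (((c + 1 : Nat)) : Int) := by
      intro o ho
      have hcons : s.drop (c + 1) = s[c + 1] :: s.drop (c + 1 + 1) := List.drop_eq_getElem_cons hlt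
      rw [hcons]
      show _ = minp (s[c + 1] :: s.drop (c + 1 + 1)) ((c + 1 : Nat) : Int)
      cases o with
      | none =>
        simp only [minp, ← ho, hget]
      | some cc =>
        simp only [minp, ← ho, hget]
        by_cases htie : s[c + 1] ≤ cc.1 <;> simp [htie]
    have hc2 : ((c + 1 : Nat) : Int) = (c : Int) + 1 := by push_cast; ring
    have hr : ((c + 1 : Nat) : Int) - 1 = ((c : Nat) : Int) := by push_cast; ring
    have hmps : minp (s.drop (c + 1)) ((c : Int) + 1) = some (pvP s (c + 1)) := by
      have h2 := minp_drop_some s (c + 1) hlt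
      rwa [hc2] at h2
    have hG : (match minp (s.drop (c + 1 + 1)) (((c + 1 : Nat) : Int) + 1) with
          | none => (PySem.List.pyGetD s ((c + 1 : Nat) : Int) 0, ((c + 1 : Nat) : Int))
          | some cc => if PySem.List.pyGetD s ((c + 1 : Nat) : Int) 0 ≤ cc.1
              then (PySem.List.pyGetD s ((c + 1 : Nat) : Int) 0, ((c + 1 : Nat) : Int)) else cc)
        = pvP s (c + 1) := by
      have hw2 := hstep (minp (s.drop (c + 1 + 1)) (((c + 1 : Nat) : Int) + 1)) rfl
      have hmps' : minp (s.drop (c + 1)) ((c + 1 : Nat) : Int) = some (pvP s (c + 1)) := by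
        rw [hc2]; exact hmps
      rw [hmps'] at hw2
      exact Option.some_injective _ hw2
    rw [hr]
    simp only [hG]
    rw [← hmps, ih (by omega) (acc ++ [pvP s (c + 1)])]
    simp [List.range_succ_eq_map, List.map_map, Function.comp_def, Nat.succ_sub_succ]

-- the loop body A's inner loop collapses to: one comparison with the suffix-min pair
def gRow (s : List Int) (st : Int × List Int) (i : Int) : Int × List Int :=
  match minp (s.drop (i + 1).toNat) (i + 1) with
  | none => st
  | some cc => if PySem.List.pyGetD s i 0 - cc.1 > st.1
      then (PySem.List.pyGetD s i 0 - cc.1, [i, cc.2]) else st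

lemma sufs_elem (s : List Int) (i : Nat) (hi : i < s.length - 1) :
    (((List.range (s.length - 1)).map (fun t => pvP s (s.length - 1 - t))).reverse).getD i (0, 0)
      = pvP s (i + 1) := by
  rw [List.getD_eq_getElem _ _ (by simp; omega)]
  rw [List.getElem_reverse]
  simp only [List.getElem_map, List.getElem_range, List.length_map, List.length_range]
  congr 1
  omega

lemma main_eq (s : List Int) : max_diff_in_list_lr s = max_diff_in_list_lr_alt s := by
  by_cases hs : s = []
  · subst hs; rfl
  have hn : 0 < s.length := List.length_pos_iff.mpr hs
  simp only [max_diff_in_list_lr, max_diff_in_list_lr_alt]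
  have hc : ((s.length : Int) - 1) = ((s.length - 1 : Nat) : Int) := by omega
  have hnone : minp (s.drop ((s.length - 1) + 1)) (((s.length - 1 : Nat) : Int) + 1)
      = (none : Option (Int × Int)) := by
    have h1 : s.length - 1 + 1 = s.length := by omega
    rw [h1, List.drop_length]
    simp [minp]
  rw [hc, show (([], (none : Option (Int × Int))) : List (Int × Int) × Option (Int × Int))
      = ([], minp (s.drop ((s.length - 1) + 1)) (((s.length - 1 : Nat) : Int) + 1)) from by rw [hnone],
    Bsuf s (s.length - 1) (by omega) []]
  simp only [List.nil_append]
  -- A: collapse each inner loop to a single suffix-min comparison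
  have hbody : ∀ (acc : Int × List Int), ∀ i ∈ PySem.List.pyRange 0 (s.length : Int) 1,
      (fun (st : Int × List Int) i =>
        (PySem.List.pyRange (i + 1) (s.length : Int) 1).foldl
          (fun (st : Int × List Int) j =>
            if PySem.List.pyGetD s i 0 - PySem.List.pyGetD s j 0 > st.1
            then (PySem.List.pyGetD s i 0 - PySem.List.pyGetD s j 0, [i, j]) else st) st) acc i
      = gRow s acc i := by
    intro acc i hi
    rw [PySem.List.mem_pyRange_one] at hi
    exact innerA s (PySem.List.pyGetD s i 0) i (s.length - (i + 1).toNat) (i + 1) acc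
      (by omega) (by omega)
  rw [PySem.List.foldl_congr_mem _ _ (gRow s) _ hbody]
  have hsplit : PySem.List.pyRange 0 (s.length : Int) 1
      = PySem.List.pyRange 0 ((s.length - 1 : Nat) : Int) 1 ++ [((s.length - 1 : Nat) : Int)] := by
    rw [PySem.List.pyRange_one_append 0 ((s.length - 1 : Nat) : Int) (s.length : Int) (by omega) (by omega)]
    congr 1
    rw [PySem.List.pyRange_one_cons (by omega), PySem.List.pyRange_one_eq_nil (by omega)]
  rw [hsplit, List.foldl_append]
  have hlast : ∀ st : Int × List Int, List.foldl (gRow s) st [((s.length - 1 : Nat) : Int)] = st := by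
    intro st
    simp only [List.foldl_cons, List.foldl_nil, gRow]
    have h2 : ((((s.length - 1 : Nat) : Int)) + 1).toNat = s.length := by omega
    rw [h2, List.drop_length]
    simp [minp]
  rw [hlast]
  have hlen2 : ((List.map (fun t => pvP s (s.length - 1 - t)) (List.range (s.length - 1))).reverse).length
      = s.length - 1 := by simp
  rw [hlen2]
  refine congrArg Prod.snd ?_
  apply PySem.List.foldl_congr_mem
  intro acc i hi
  rw [PySem.List.mem_pyRange_one] at hi
  have hi0 : 0 ≤ i := hi.1
  have hilt : i.toNat < s.length - 1 := by omega
  have hmj : PySem.List.pyGetD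
      ((List.map (fun t => pvP s (s.length - 1 - t)) (List.range (s.length - 1))).reverse)
      i ((0 : Int), (0 : Int)) = pvP s (i.toNat + 1) := by
    rw [PySem.List.pyGetD_of_nonneg _ _ hi0]
    exact sufs_elem s i.toNat hilt
  have hminp : minp (s.drop (i + 1).toNat) (i + 1) = some (pvP s (i.toNat + 1)) := by
    have h1 : (i + 1).toNat = i.toNat + 1 := by omega
    have h2 := minp_drop_some s (i.toNat + 1) (by omega)
    rw [h1]
    rw [show ((i.toNat + 1 : Nat) : Int) = i + 1 from by omega] at h2
    exact h2
  simp only [gRow, hminp, hmj]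

-- ===== VERDICT (by name: the statement is the Claim_ definition above) =====
theorem max_diff_in_list_lr_spec : Claim_equal_max_diff_in_list_lr := by
  intro s _
  exact main_eq s
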